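-- pv_equiv track=rewrite | github.com/AxelRuLo/proyecto3LA | maquinaTouring.py | touringGearsString
-- ===== SOURCE A (Python) =====
-- def touringGearsString(cinta:list):
--     listaStrings = []
--     for index in range(len(cinta)):
--         if(cinta[index].count("'")>0 or cinta[index].count('"')>0):
--             listaStrings.append(index)
--     if(len(cinta)==1):
--         return True
--     for index in listaStrings:
--         if(index-1<0):
--             if(cinta[index+1]!="+"):
--                 return False
--         elif(index+1>len(cinta)-1):
--             if(cinta[index+-1]!="+"):
--                 return False
--         else:
--             if(cinta[index+1]!="+" or cinta[index-1]!="+"):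
--                 return False
--     return True
-- ===== SOURCE B (Python) =====
-- def touringGearsString(cinta: list):
--     if len(cinta) == 1:
--         return True
--     padded = ["+"] + cinta + ["+"]
--     for prev, cur, nxt in zip(padded, cinta, padded[2:]):
--         if (cur.count("'") > 0 or cur.count('"') > 0) and not (prev == "+" and nxt == "+"):
--             return False
--     return True
-- ===== Notes on version B (the rewrite author's own statement) =====
-- stated objective: simpler
-- what changed: Replaces the two-pass scheme (collect quoted indices, then re-index the tape with a three-way boundary branch) by one pass over (prev, cur, next) triples obtained by zipping the tape against a '+'-padded copy of itself, so no index list and no boundary case analysis are needed.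
import Mathlib
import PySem

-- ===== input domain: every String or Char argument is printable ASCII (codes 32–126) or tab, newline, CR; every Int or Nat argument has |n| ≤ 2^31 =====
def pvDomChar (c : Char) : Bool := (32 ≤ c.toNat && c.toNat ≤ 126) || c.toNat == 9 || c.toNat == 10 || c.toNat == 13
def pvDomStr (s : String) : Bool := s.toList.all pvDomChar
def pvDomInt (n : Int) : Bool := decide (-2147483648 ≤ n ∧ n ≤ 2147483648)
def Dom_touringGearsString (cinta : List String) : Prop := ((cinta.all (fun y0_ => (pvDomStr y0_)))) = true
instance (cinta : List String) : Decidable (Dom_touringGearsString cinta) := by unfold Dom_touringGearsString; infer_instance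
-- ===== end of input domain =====

-- B replaces A's two passes (collect quoted indices, then re-index with boundary branches)
-- by one pass over (prev, cur, next) triples from zipping against a '+'-padded tape; objective: simpler.

-- ===== PORT A =====
def touringGearsString (cinta : List String) : Bool :=
  let listaStrings : List Int :=
    (PySem.List.pyRange 0 (cinta.length : Int) 1).foldl
      (fun acc index =>
        if decide (0 < PySem.Str.count (PySem.List.pyGetD cinta index "") "'")
           || decide (0 < PySem.Str.count (PySem.List.pyGetD cinta index "") "\"")
        then acc ++ [index] else acc) []
  if cinta.length == 1 then true
  else
    listaStrings.all (fun index =>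
      if index - 1 < 0 then
        PySem.List.pyGetD cinta (index + 1) "" == "+"
      else if index + 1 > (cinta.length : Int) - 1 then
        PySem.List.pyGetD cinta (index - 1) "" == "+"
      else
        (PySem.List.pyGetD cinta (index + 1) "" == "+")
          && (PySem.List.pyGetD cinta (index - 1) "" == "+"))

-- ===== PORT B =====
def touringGearsString_alt (cinta : List String) : Bool :=
  if cinta.length == 1 then true
  else
    let padded := ["+"] ++ cinta ++ ["+"]
    ((padded.zip cinta).zip (padded.drop 2)).all
      (fun t =>
        !((decide (0 < PySem.Str.count t.1.2 "'")
            || decide (0 < PySem.Str.count t.1.2 "\""))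
          && !(t.1.1 == "+" && t.2 == "+")))

-- ===== PRECONDITION & SPEC =====
def Spec_touringGearsString (cinta : List String) (out : Bool) : Prop := out = touringGearsString_alt cinta
instance (cinta : List String) (out : Bool) : Decidable (Spec_touringGearsString cinta out) := by unfold Spec_touringGearsString; infer_instance

-- ===== CLAIM (what is proved, stated in full; the proofs are below) =====
def Claim_equal_touringGearsString : Prop := ∀ (cinta : List String), Dom_touringGearsString cinta → Spec_touringGearsString cinta (touringGearsString cinta)

-- ===== LEMMAS AND PROOFS =====
-- Good: "the tape is a singleton, or every quoted token has '+' on each existing side";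
-- both ports are characterized by it.
def Good (cinta : List String) : Prop :=
  cinta.length = 1 ∨
  ∀ i, i < cinta.length →
    (0 < PySem.Str.count (cinta.getD i "") "'" ∨ 0 < PySem.Str.count (cinta.getD i "") "\"") →
    ((i = 0 ∨ cinta.getD (i-1) "" = "+") ∧ (i + 1 = cinta.length ∨ cinta.getD (i+1) "" = "+"))

lemma A_char (cinta : List String) : touringGearsString cinta = true ↔ Good cinta := by
  unfold touringGearsString Good
  simp only [PySem.List.foldl_append_if_eq_filter, List.nil_append, List.all_filter]
  by_cases h1 : cinta.length = 1
  · simp [h1]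
  · rw [if_neg (by simp [h1])]
    simp only [h1, false_or]
    rw [List.all_eq_true]
    constructor
    · intro H i hi hq
      have hx := H (i : Int) (by rw [PySem.List.mem_pyRange_one]; omega)
      simp only [PySem.List.pyGetD_natCast] at hx
      have hqb : (decide (0 < PySem.Str.count (cinta.getD i "") "'") ||
          decide (0 < PySem.Str.count (cinta.getD i "") "\"")) = true := by
        rcases hq with h | h <;> rw [decide_eq_true h] <;> simp
      rw [hqb] at hx
      simp only [Bool.not_true, Bool.false_or] at hx
      have e1 : ((i : Int) + 1) = ((i + 1 : Nat) : Int) := by omega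
      by_cases h0 : i = 0
      · subst h0
        rw [if_pos (by norm_num)] at hx
        rw [e1, PySem.List.pyGetD_natCast] at hx
        exact ⟨Or.inl rfl, Or.inr (by simpa using hx)⟩
      · have e2 : ((i : Int) - 1) = ((i - 1 : Nat) : Int) := by omega
        by_cases hlast : i + 1 = cinta.length
        · rw [if_neg (by omega), if_pos (by omega)] at hx
          rw [e2, PySem.List.pyGetD_natCast] at hx
          exact ⟨Or.inr (by simpa using hx), Or.inl hlast⟩
        · rw [if_neg (by omega), if_neg (by omega)] at hx
          rw [e1, e2, PySem.List.pyGetD_natCast, PySem.List.pyGetD_natCast,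
            Bool.and_eq_true] at hx
          exact ⟨Or.inr (by simpa using hx.2), Or.inr (by simpa using hx.1)⟩
    · intro H x hx
      rw [PySem.List.mem_pyRange_one] at hx
      obtain ⟨i, rfl⟩ : ∃ i : Nat, x = (i : Int) := ⟨x.toNat, by omega⟩
      have hi : i < cinta.length := by omega
      simp only [PySem.List.pyGetD_natCast]
      by_cases hq : 0 < PySem.Str.count (cinta.getD i "") "'" ∨
          0 < PySem.Str.count (cinta.getD i "") "\""
      · obtain ⟨ha, hb⟩ := H i hi hq
        rw [Bool.or_eq_true]; right
        have e1 : ((i : Int) + 1) = ((i + 1 : Nat) : Int) := by omega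
        by_cases h0 : i = 0
        · subst h0
          rw [if_pos (by norm_num)]
          have hb' : cinta.getD (0+1) "" = "+" := by
            rcases hb with h | h
            · omega
            · exact h
          rw [e1, PySem.List.pyGetD_natCast]
          simp only [List.getD_eq_getElem?_getD] at hb'
          simp [hb']
        · have e2 : ((i : Int) - 1) = ((i - 1 : Nat) : Int) := by omega
          have ha' : cinta.getD (i-1) "" = "+" := by tauto
          by_cases hlast : i + 1 = cinta.length
          · rw [if_neg (by omega), if_pos (by omega)]
            rw [e2, PySem.List.pyGetD_natCast]
            simp only [List.getD_eq_getElem?_getD] at ha'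
            simp [ha']
          · have hb' : cinta.getD (i+1) "" = "+" := by tauto
            rw [if_neg (by omega), if_neg (by omega)]
            rw [e1, e2, PySem.List.pyGetD_natCast, PySem.List.pyGetD_natCast]
            simp only [List.getD_eq_getElem?_getD] at ha' hb'
            simp [ha', hb']
      · rw [Bool.or_eq_true]; left
        rw [decide_eq_false (fun h => hq (Or.inl h)),
          decide_eq_false (fun h => hq (Or.inr h))]
        rfl

lemma B_char (cinta : List String) : touringGearsString_alt cinta = true ↔ Good cinta := by
  unfold touringGearsString_alt Good
  by_cases h1 : cinta.length = 1
  · simp [h1]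
  · rw [if_neg (by simp [h1])]
    simp only [h1, false_or]
    have hzip : (((["+"] ++ cinta ++ ["+"]).zip cinta).zip ((["+"] ++ cinta ++ ["+"]).drop 2)) =
        (List.range cinta.length).map (fun i =>
          (((["+"] ++ cinta ++ ["+"]).getD i "", cinta.getD i ""),
            (["+"] ++ cinta ++ ["+"]).getD (2+i) "")) := by
      apply List.ext_getElem
      · simp; omega
      · intro i hL hR
        have hi : i < cinta.length := by simpa using hR
        simp [List.getElem_zip, hi]
        have h2i : ("+" :: (cinta ++ ["+"]))[2+i]? = (cinta ++ ["+"])[i+1]? := by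
          rw [show 2+i = (i+1)+1 by omega]
          simp
        rw [h2i, List.getElem?_eq_getElem (by simp; omega),
          List.getElem?_eq_getElem (by simp; omega)]
        exact ⟨rfl, rfl⟩
    have hPs : ∀ j, j < cinta.length →
        (["+"] ++ cinta ++ ["+"]).getD (j+1) "" = cinta.getD j "" := by
      intro j hj
      simp [List.getD_eq_getElem?_getD, List.getElem?_append, hj]
    have hPn : (["+"] ++ cinta ++ ["+"]).getD (cinta.length+1) "" = "+" := by
      simp [List.getD_eq_getElem?_getD]
    rw [hzip]
    simp only [List.all_map, List.all_eq_true, List.mem_range, Function.comp]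
    constructor
    · intro H i hi hq
      have hx := H i hi
      have hqb : (decide (0 < PySem.Str.count (cinta.getD i "") "'") ||
          decide (0 < PySem.Str.count (cinta.getD i "") "\"")) = true := by
        rcases hq with h | h <;> rw [decide_eq_true h] <;> simp
      rw [hqb, Bool.true_and, Bool.not_not, Bool.and_eq_true] at hx
      obtain ⟨hprev, hnext⟩ := hx
      constructor
      · by_cases h0 : i = 0
        · exact Or.inl h0
        · right
          rw [show i = (i-1)+1 from by omega, hPs (i-1) (by omega)] at hprev
          simpa using hprev
      · by_cases hlast : i + 1 = cinta.length
        · exact Or.inl hlast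
        · right
          rw [show 2+i = (i+1)+1 from by omega, hPs (i+1) (by omega)] at hnext
          simpa using hnext
    · intro H i hi
      by_cases hq : 0 < PySem.Str.count (cinta.getD i "") "'" ∨
          0 < PySem.Str.count (cinta.getD i "") "\""
      · obtain ⟨ha, hb⟩ := H i hi hq
        have hprev : (["+"] ++ cinta ++ ["+"]).getD i "" = "+" := by
          by_cases h0 : i = 0
          · subst h0; rfl
          · rcases ha with h0' | h
            · omega
            · rw [show i = (i-1)+1 from by omega, hPs (i-1) (by omega)]
              exact h
        have hnext : (["+"] ++ cinta ++ ["+"]).getD (2+i) "" = "+" := by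
          by_cases hlast : i + 1 = cinta.length
          · rw [show 2+i = cinta.length+1 from by omega]
            exact hPn
          · rcases hb with h0' | h
            · omega
            · rw [show 2+i = (i+1)+1 from by omega, hPs (i+1) (by omega)]
              exact h
        rw [hprev, hnext]
        simp
      · rw [decide_eq_false (fun h => hq (Or.inl h)),
          decide_eq_false (fun h => hq (Or.inr h))]
        rfl

-- ===== VERDICT (by name: the statement is the Claim_ definition above) =====
theorem touringGearsString_spec : Claim_equal_touringGearsString := by
  intro cinta _
  unfold Spec_touringGearsString
  exact Bool.eq_iff_iff.mpr ((A_char cinta).trans (B_char cinta).symm)
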